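-- pv_equiv track=rewrite | github.com/AMISTAD-lab/bias-in-data-source | mg_calculator_count_based.py | min_bins_required
-- ===== SOURCE A (Python) =====
-- def min_bins_required(bin_list, lower_limit):
--     """
--     Returns the minimum number of bins from a list
--     that are required to hold lower_limit balls
--     """
--     if max(bin_list) >= lower_limit:
--         return 1
--     else:
--         max_val = max(bin_list)
--         temp_bin_list = bin_list[:]
--         temp_bin_list.remove(max_val)
--         return 1 + min_bins_required(temp_bin_list, lower_limit-max_val)
-- ===== SOURCE B (Python) =====
-- def min_bins_required(bin_list, lower_limit):
--     """
--     Returns the minimum number of bins from a list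
--     that are required to hold lower_limit balls
--     """
--     total = 0
--     count = 1
--     for v in sorted(bin_list, reverse=True):
--         total += v
--         if total >= lower_limit:
--             return count
--         count += 1
--     raise ValueError("bins cannot hold lower_limit balls")
-- ===== Notes on version B (the rewrite author's own statement) =====
-- stated objective: alternative
-- what changed: replaces the recursive repeated max()+remove() scan (one full scan and a copy per selected bin) by a single descending sort followed by one running-sum pass that returns at the first prefix reaching lower_limit
import Mathlib
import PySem

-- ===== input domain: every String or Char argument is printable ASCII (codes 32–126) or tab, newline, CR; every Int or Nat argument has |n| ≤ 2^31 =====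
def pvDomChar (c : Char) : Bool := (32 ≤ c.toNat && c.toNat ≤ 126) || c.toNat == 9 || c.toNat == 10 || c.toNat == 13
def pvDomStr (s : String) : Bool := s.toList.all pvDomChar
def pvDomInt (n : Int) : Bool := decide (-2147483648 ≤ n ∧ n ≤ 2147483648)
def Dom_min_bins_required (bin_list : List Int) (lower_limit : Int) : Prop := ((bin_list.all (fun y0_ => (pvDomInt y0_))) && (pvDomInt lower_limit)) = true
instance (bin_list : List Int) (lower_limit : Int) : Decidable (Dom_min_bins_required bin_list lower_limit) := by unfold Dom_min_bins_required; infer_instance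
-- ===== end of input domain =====

-- B replaces A's recursive repeated max()+remove() scans by one descending sort plus a single running-sum pass (alternative algorithm, same observed cost).


-- ===== PORT A =====
-- literal port of A: max(bin_list); if max >= lower_limit return 1; else copy, remove(max), recurse
def min_bins_required (bin_list : List Int) (lower_limit : Int) : Int :=
  match hm : PySem.List.max? bin_list (fun x => x) with
  | none => 0          -- Python: max([]) raises ValueError; excluded by Pre_
  | some max_val =>
    if max_val ≥ lower_limit then 1
    else
      match hr : PySem.List.remove? bin_list max_val with
      | none => 0      -- unreachable: max_val ∈ bin_list
      | some temp_bin_list => 1 + min_bins_required temp_bin_list (lower_limit - max_val)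
termination_by bin_list.length
decreasing_by
  have hmem : max_val ∈ bin_list := PySem.List.max?_mem hm
  rw [PySem.List.remove?_eq_some_erase bin_list max_val hmem] at hr
  cases hr
  have h1 := List.length_erase_of_mem hmem
  have h2 : bin_list ≠ [] := by rintro rfl; simp at hmem
  have h3 : 0 < bin_list.length := List.length_pos_iff.mpr h2
  omega

-- ===== PORT B =====
-- the for-loop of B: running total and count over the sorted list
def altGo (s : List Int) (lower_limit total count : Int) : Int :=
  match s with
  | [] => 0            -- Python B raises ValueError here; excluded by Pre_
  | v :: rest =>
    let total' := total + v
    if total' ≥ lower_limit then count else altGo rest lower_limit total' (count + 1)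

def min_bins_required_alt (bin_list : List Int) (lower_limit : Int) : Int :=
  altGo (PySem.List.sorted bin_list (fun x => x) true) lower_limit 0 1

-- ===== PRECONDITION & SPEC =====
-- Pre_ excludes exactly the inputs on which Python A raises ValueError: A (and B) return iff the
-- list is nonempty and either its positive elements sum to at least lower_limit or, with no
-- positive element, some (hence the maximal) element already reaches lower_limit.
def Pre_min_bins_required (bin_list : List Int) (lower_limit : Int) : Prop :=
  bin_list ≠ [] ∧
  ((∃ x ∈ bin_list, 0 < x) → lower_limit ≤ (bin_list.filter (fun x => 0 < x)).sum) ∧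
  ((∀ x ∈ bin_list, x ≤ 0) → ∃ x ∈ bin_list, lower_limit ≤ x)
instance (bin_list : List Int) (lower_limit : Int) : Decidable (Pre_min_bins_required bin_list lower_limit) := by unfold Pre_min_bins_required; infer_instance

def pvWitness_min_bins_required : List Int × Int := ([3, 1, 2], 5)

def Spec_min_bins_required (bin_list : List Int) (lower_limit : Int) (out : Int) : Prop := out = min_bins_required_alt bin_list lower_limit
instance (bin_list : List Int) (lower_limit : Int) (out : Int) : Decidable (Spec_min_bins_required bin_list lower_limit out) := by unfold Spec_min_bins_required; infer_instance

-- ===== CLAIM (what is proved, stated in full; the proofs are below) =====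
def Claim_equal_min_bins_required : Prop := ∀ (bin_list : List Int) (lower_limit : Int), Dom_min_bins_required bin_list lower_limit → Pre_min_bins_required bin_list lower_limit → Spec_min_bins_required bin_list lower_limit (min_bins_required bin_list lower_limit)

-- ===== LEMMAS AND PROOFS =====

-- "some nonempty prefix of s sums to at least r" — exactly the states from which B's loop returns
def reach (s : List Int) (r : Int) : Prop :=
  match s with
  | [] => False
  | v :: rest => r ≤ v ∨ reach rest (r - v)

theorem sorted_rev_eq_of_perm_ge (xs ys : List Int) (hp : ys.Perm xs)
    (hs : ys.Pairwise (fun a b => b ≤ a)) :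
    PySem.List.sorted xs (fun x => x) true = ys :=
  List.Perm.eq_of_pairwise (fun _ _ _ _ h1 h2 => le_antisymm h2 h1)
    (PySem.List.sorted_pairwise_rev ..) hs ((PySem.List.sorted_perm ..).trans hp.symm)

theorem sorted_rev_cons_max (l : List Int) (m : Int)
    (hm : PySem.List.max? l (fun x => x) = some m) :
    PySem.List.sorted l (fun x => x) true = m :: PySem.List.sorted (l.erase m) (fun x => x) true := by
  have hmem : m ∈ l := PySem.List.max?_mem hm
  have hmax : ∀ y ∈ l, y ≤ m := PySem.List.max?_isMax hm
  apply sorted_rev_eq_of_perm_ge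
  · exact (List.Perm.cons m (PySem.List.sorted_perm ..)).trans (List.perm_cons_erase hmem).symm
  · refine List.pairwise_cons.mpr ⟨?_, PySem.List.sorted_pairwise_rev ..⟩
    intro y hy
    exact hmax y (List.erase_subset ((PySem.List.mem_sorted ..).mp hy))

-- unfolding lemma for port A at a nonempty list
theorem minA_eq (l : List Int) (ll m : Int)
    (hm : PySem.List.max? l (fun x => x) = some m) :
    min_bins_required l ll =
      if m ≥ ll then 1 else 1 + min_bins_required (l.erase m) (ll - m) := by
  have hmem : m ∈ l := PySem.List.max?_mem hm
  have hrem : PySem.List.remove? l m = some (l.erase m) :=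
    PySem.List.remove?_eq_some_erase l m hmem
  conv_lhs => rw [min_bins_required.eq_def]
  split
  · next heq => rw [heq] at hm; cases hm
  · next mv heq =>
    rw [heq] at hm
    injection hm with hm
    subst hm
    by_cases h : mv ≥ ll
    · rw [if_pos h, if_pos h]
    · rw [if_neg h, if_neg h]
      split
      · next heq2 => rw [hrem] at heq2; cases heq2
      · next temp heq2 =>
        rw [hrem] at heq2
        injection heq2 with heq2
        subst heq2
        rfl

theorem altGo_shift (s : List Int) : ∀ ll t c, reach s (ll - t) →
    altGo s ll t c = altGo s (ll - t) 0 1 + (c - 1) := by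
  induction s with
  | nil => intro _ _ _ h; exact h.elim
  | cons v rest ih =>
    intro ll t c h
    simp only [altGo]
    by_cases hv : ll - t ≤ v
    · rw [if_pos (by omega), if_pos (by omega)]; ring
    · rw [if_neg (by omega), if_neg (by omega)]
      have hr : reach rest (ll - t - v) := by
        simp only [reach] at h
        rcases h with h | h
        · omega
        · exact h
      have e1 := ih ll (t + v) (c + 1)
        (by rw [show ll - (t + v) = ll - t - v by ring]; exact hr)
      have e2 := ih (ll - t) (0 + v) (1 + 1)
        (by rw [show ll - t - (0 + v) = ll - t - v by ring]; exact hr)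
      rw [e1, e2, show ll - (t + v) = ll - t - (0 + v) by ring]
      ring

theorem reach_of_prefix : ∀ (p q : List Int) (r : Int), p ≠ [] → r ≤ p.sum → reach (p ++ q) r := by
  intro p
  induction p with
  | nil => intro _ _ h; exact absurd rfl h
  | cons v p' ih =>
    intro q r _ hsum
    by_cases hv : r ≤ v
    · exact Or.inl hv
    · refine Or.inr ?_
      have hp' : p' ≠ [] := by
        rintro rfl; simp at hsum; omega
      exact ih q (r - v) hp' (by simp at hsum ⊢; omega)

-- in a descending list the positive elements form a prefix
theorem filter_pos_prefix (s : List Int) (hs : s.Pairwise (fun a b => b ≤ a)) :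
    ∃ q, s = s.filter (fun x => decide (0 < x)) ++ q := by
  induction s with
  | nil => exact ⟨[], rfl⟩
  | cons v rest ih =>
    rcases List.pairwise_cons.mp hs with ⟨hle, hrest⟩
    by_cases hv : 0 < v
    · obtain ⟨q, hq⟩ := ih hrest
      refine ⟨q, ?_⟩
      simp only [List.filter_cons, hv, decide_true]
      exact congrArg (v :: ·) hq
    · refine ⟨v :: rest, ?_⟩
      have h1 : (v :: rest).filter (fun x => decide (0 < x)) = [] := by
        rw [List.filter_eq_nil_iff]
        intro x hx
        rcases List.mem_cons.mp hx with rfl | hx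
        · simpa using hv
        · have := hle x hx; simp; omega
      rw [h1]; rfl

theorem reach_of_pre (l : List Int) (ll : Int) (hp : Pre_min_bins_required l ll) :
    reach (PySem.List.sorted l (fun x => x) true) ll := by
  obtain ⟨hne, hpos, hnp⟩ := hp
  have hperm : (PySem.List.sorted l (fun x => x) true).Perm l := PySem.List.sorted_perm ..
  by_cases hex : ∃ x ∈ l, 0 < x
  · have hsum := hpos hex
    obtain ⟨q, hq⟩ := filter_pos_prefix _ (PySem.List.sorted_pairwise_rev l (fun x => x))
    have hfsum : ((PySem.List.sorted l (fun x => x) true).filter (fun x => decide (0 < x))).sum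
        = (l.filter (fun x => 0 < x)).sum := by
      simpa using (hperm.filter (fun x => decide (0 < x))).sum_eq
    have hfne : (PySem.List.sorted l (fun x => x) true).filter (fun x => decide (0 < x)) ≠ [] := by
      obtain ⟨x, hx, hx0⟩ := hex
      have hxm : x ∈ (PySem.List.sorted l (fun x => x) true).filter (fun x => decide (0 < x)) := by
        rw [List.mem_filter]
        exact ⟨hperm.mem_iff.mpr hx, by simpa using hx0⟩
      intro h; rw [h] at hxm; simp at hxm
    rw [hq]
    exact reach_of_prefix _ _ ll hfne (by omega)
  · have hall : ∀ x ∈ l, x ≤ 0 := by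
      intro x hx; by_contra h; exact hex ⟨x, hx, by omega⟩
    obtain ⟨x, hx, hllx⟩ := hnp hall
    have hsne : PySem.List.sorted l (fun x => x) true ≠ [] := by
      intro h; exact hne ((PySem.List.sorted_eq_nil_iff _ _ _).mp h)
    obtain ⟨h, t, hst⟩ := List.exists_cons_of_ne_nil hsne
    have hge : x ≤ h := PySem.List.key_head_sorted_rev_ge l (fun x => x) hst x hx
    rw [hst]
    exact Or.inl (by omega)

theorem main_eq (n : Nat) : ∀ (l : List Int) (ll : Int), l.length ≤ n →
    reach (PySem.List.sorted l (fun x => x) true) ll →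
    min_bins_required l ll = altGo (PySem.List.sorted l (fun x => x) true) ll 0 1 := by
  induction n with
  | zero =>
    intro l ll hlen hr
    have hnil : l = [] := List.length_eq_zero_iff.mp (Nat.le_zero.mp hlen)
    subst hnil
    rw [(PySem.List.sorted_eq_nil_iff _ _ _).mpr rfl] at hr
    exact hr.elim
  | succ n ih =>
    intro l ll hlen hr
    by_cases hnil : l = []
    · subst hnil
      rw [(PySem.List.sorted_eq_nil_iff _ _ _).mpr rfl] at hr
      exact hr.elim
    · obtain ⟨m, hm⟩ : ∃ m, PySem.List.max? l (fun x => x) = some m := by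
        cases hmx : PySem.List.max? l (fun x => x) with
        | none => exact absurd ((PySem.List.max?_eq_none_iff _ _).mp hmx) hnil
        | some m => exact ⟨m, rfl⟩
      have hs := sorted_rev_cons_max l m hm
      rw [minA_eq l ll m hm, hs]
      by_cases hge : m ≥ ll
      · rw [if_pos hge]
        simp only [altGo]
        rw [if_pos (by omega)]
      · rw [if_neg hge]
        rw [hs] at hr
        simp only [reach] at hr
        have hr' : reach (PySem.List.sorted (l.erase m) (fun x => x) true) (ll - m) := by
          rcases hr with h | h
          · exact absurd (by omega : m ≥ ll) hge
          · exact h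
        have hmem : m ∈ l := PySem.List.max?_mem hm
        have hlen' : (l.erase m).length ≤ n := by
          have h1 := List.length_erase_of_mem hmem
          have h2 : 0 < l.length := List.length_pos_iff.mpr hnil
          omega
        have hrhs : altGo (m :: PySem.List.sorted (l.erase m) (fun x => x) true) ll 0 1
            = altGo (PySem.List.sorted (l.erase m) (fun x => x) true) (ll - m) 0 1 + 1 := by
          simp only [altGo]
          rw [if_neg (by omega)]
          have hsh := altGo_shift (PySem.List.sorted (l.erase m) (fun x => x) true) ll (0 + m) (1 + 1)
            (by rw [show ll - (0 + m) = ll - m by ring]; exact hr')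
          rw [hsh, show ll - (0 + m) = ll - m by ring]
          ring
        rw [hrhs, ih (l.erase m) (ll - m) hlen' hr']
        ring

-- ===== VERDICT (by name: the statement is the Claim_ definition above) =====
theorem min_bins_required_spec : Claim_equal_min_bins_required := by
  intro l ll _ hp
  unfold Spec_min_bins_required min_bins_required_alt
  exact main_eq l.length l ll le_rfl (reach_of_pre l ll hp)
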